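-- pv_equiv track=rewrite | github.com/raymondraglin/prime-backend | app/prime/math/practice/combine_like_terms.py | _build_expression
-- ===== SOURCE A (Python) =====
-- from typing import List
--
-- def _format_term(coefficient: int, var: str, is_first: bool) -> str:
--     if coefficient == 0:
--         return ""
--
--     sign = "+" if coefficient > 0 else "-"
--     abs_coef = abs(coefficient)
--
--     if abs_coef == 1:
--         core = var
--     else:
--         core = f"{abs_coef}{var}"
--
--     if is_first:
--         return f"{core}" if coefficient > 0 else f"-{core}"
--     else:
--         return f" {sign} {core}"
--
-- def _format_constant(constant: int, is_first: bool) -> str: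
--     if constant == 0:
--         return ""
--
--     sign = "+" if constant > 0 else "-"
--     abs_val = abs(constant)
--
--     if is_first:
--         return f"{abs_val}" if constant > 0 else f"-{abs_val}"
--     else:
--         return f" {sign} {abs_val}"
--
-- def _build_expression(a: int, b: int, c: int, var: str) -> str:
--     parts: List[str] = []
--     first = True
--
--     for coef in [a, b]:
--         term = _format_term(coef, var, is_first=first)
--         if term:
--             parts.append(term)
--             first = False
--
--     const = _format_constant(c, is_first=first)
--     if const:
--         parts.append(const)
--
--     if not parts:
--         return "0"
--
--     return "".join(parts)
-- ===== SOURCE B (Python) =====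
-- def _build_expression(a: int, b: int, c: int, var: str) -> str:
--     # Emit every non-zero term uniformly with a signed " + "/" - " separator
--     # (no first-term tracking at all), then normalise the leading separator.
--     s = ""
--     for value, symbol in ((a, var), (b, var), (c, "")):
--         if value:
--             core = symbol if abs(value) == 1 and symbol else str(abs(value)) + symbol
--             s += (" + " if value > 0 else " - ") + core
--     if not s:
--         return "0"
--     return s[3:] if s.startswith(" + ") else "-" + s[3:]
-- ===== Notes on version B (the rewrite author's own statement) =====
-- stated objective: alternative
-- what changed: B drops the first-term tracking entirely: it emits every non-zero term uniformly with a signed ' + '/' - ' separator into one string, then normalises the leading separator by string surgery (strip ' + ' or rewrite ' - ' to '-'), instead of A's two per-kind helpers branching on an is_first flag.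
-- intended difference: When var is the empty string and a or b is 1 or -1, A's term formatter yields an empty (or dangling '-') fragment and silently drops the coefficient (A(1,0,5,'') = '5', A(-1,2,0,'') = '- + 2'); B prints it ('1 + 5', '-1 + 2'), which is the intended rendering. — e.g. on _build_expression(1, 0, 5, ""): A returns "5", B returns "1 + 5"
import Mathlib
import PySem

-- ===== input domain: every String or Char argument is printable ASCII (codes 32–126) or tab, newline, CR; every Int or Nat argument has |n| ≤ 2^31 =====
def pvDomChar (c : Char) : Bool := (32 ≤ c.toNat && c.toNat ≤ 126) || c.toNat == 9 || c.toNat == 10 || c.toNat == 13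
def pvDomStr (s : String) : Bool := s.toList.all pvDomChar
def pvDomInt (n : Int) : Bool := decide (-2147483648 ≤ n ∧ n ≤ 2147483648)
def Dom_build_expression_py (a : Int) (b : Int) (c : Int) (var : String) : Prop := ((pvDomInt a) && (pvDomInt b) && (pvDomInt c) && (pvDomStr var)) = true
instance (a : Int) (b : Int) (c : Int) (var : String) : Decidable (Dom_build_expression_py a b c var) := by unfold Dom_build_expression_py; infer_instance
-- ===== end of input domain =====

-- B drops A's is_first tracking and per-kind helpers: it emits every non-zero term with a uniform signed
-- " + "/" - " separator into one string, then normalises the leading separator by string surgery; on the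
-- degenerate empty variable name B prints the "1"/"-1" coefficients that A silently drops (see D_ below).

-- ===== PORT A =====
def format_term (coefficient : Int) (var : String) (is_first : Bool) : String :=
  if coefficient = 0 then ""
  else
    let sign := if coefficient > 0 then "+" else "-"
    let abs_coef := |coefficient|
    let core := if abs_coef = 1 then var else PySem.Int.toStr abs_coef ++ var
    if is_first then (if coefficient > 0 then core else "-" ++ core)
    else " " ++ sign ++ " " ++ core

def format_constant (constant : Int) (is_first : Bool) : String :=
  if constant = 0 then ""
  else
    let sign := if constant > 0 then "+" else "-"
    let abs_val := |constant|
    if is_first then (if constant > 0 then PySem.Int.toStr abs_val else "-" ++ PySem.Int.toStr abs_val)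
    else " " ++ sign ++ " " ++ PySem.Int.toStr abs_val

def build_expression_py (a : Int) (b : Int) (c : Int) (var : String) : String :=
  let st := ([a, b]).foldl (fun (s : List String × Bool) coef =>
    let term := format_term coef var s.2
    if term ≠ "" then (s.1 ++ [term], false) else s) ([], true)
  let const := format_constant c st.2
  let parts := if const ≠ "" then st.1 ++ [const] else st.1
  if parts = [] then "0" else PySem.Str.join "" parts

-- ===== PORT B =====
def build_expression_py_alt (a : Int) (b : Int) (c : Int) (var : String) : String :=
  let s := ([(a, var), (b, var), (c, "")]).foldl (fun (s : String) vp =>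
    if vp.1 ≠ 0 then
      let core := if |vp.1| = 1 ∧ vp.2 ≠ "" then vp.2 else PySem.Int.toStr |vp.1| ++ vp.2
      s ++ (if vp.1 > 0 then " + " else " - ") ++ core
    else s) ""
  if s = "" then "0"
  else if PySem.Str.startswith s " + " then PySem.Str.slice s (some 3) none
  else "-" ++ PySem.Str.slice s (some 3) none

-- ===== PRECONDITION & SPEC =====
-- When var = "" and a or b is ±1, A's term helper produces the empty (or bare "-") string, so A silently
-- drops the coefficient (e.g. A(1,0,5,"") = "5", A(-1,2,0,"") = "- + 2"); B prints it ("1 + 5", "-1 + 2"),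
-- which is the intended rendering of the expression.
def D_build_expression_py (a : Int) (b : Int) (c : Int) (var : String) : Prop :=
  var = "" ∧ (a = 1 ∨ a = -1 ∨ b = 1 ∨ b = -1)
instance (a : Int) (b : Int) (c : Int) (var : String) : Decidable (D_build_expression_py a b c var) := by
  unfold D_build_expression_py; infer_instance

def Spec_build_expression_py (a : Int) (b : Int) (c : Int) (var : String) (out : String) : Prop :=
  ¬ D_build_expression_py a b c var → out = build_expression_py_alt a b c var
instance (a : Int) (b : Int) (c : Int) (var : String) (out : String) : Decidable (Spec_build_expression_py a b c var out) := by
  unfold Spec_build_expression_py; infer_instance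

def pvDiffWitness_build_expression_py : Int × Int × Int × String := (1, 0, 5, "")
def pvDiffWitnessOut_build_expression_py : String × String := ("5", "1 + 5")

-- ===== CLAIM (what is proved, stated in full; the proofs are below) =====
def Claim_unchanged_build_expression_py : Prop := ∀ (a : Int) (b : Int) (c : Int) (var : String), Dom_build_expression_py a b c var → Spec_build_expression_py a b c var (build_expression_py a b c var)
def Claim_changed_build_expression_py : Prop := Dom_build_expression_py (pvDiffWitness_build_expression_py.1) (pvDiffWitness_build_expression_py.2.1) (pvDiffWitness_build_expression_py.2.2.1) (pvDiffWitness_build_expression_py.2.2.2) ∧ D_build_expression_py (pvDiffWitness_build_expression_py.1) (pvDiffWitness_build_expression_py.2.1) (pvDiffWitness_build_expression_py.2.2.1) (pvDiffWitness_build_expression_py.2.2.2) ∧ build_expression_py (pvDiffWitness_build_expression_py.1) (pvDiffWitness_build_expression_py.2.1) (pvDiffWitness_build_expression_py.2.2.1) (pvDiffWitness_build_expression_py.2.2.2) = pvDiffWitnessOut_build_expression_py.1 ∧ build_expression_py_alt (pvDiffWitness_build_expression_py.1) (pvDiffWitness_build_expression_py.2.1) (pvDiffWitness_build_expression_py.2.2.1)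 (pvDiffWitness_build_expression_py.2.2.2) = pvDiffWitnessOut_build_expression_py.2 ∧ pvDiffWitnessOut_build_expression_py.1 ≠ pvDiffWitnessOut_build_expression_py.2

def Claim_exact_build_expression_py : Prop := ∀ (a : Int) (b : Int) (c : Int) (var : String), Dom_build_expression_py a b c var → D_build_expression_py a b c var → build_expression_py a b c var ≠ build_expression_py_alt a b c var

-- ===== LEMMAS AND PROOFS =====
theorem str_append_ne_empty_left (s t : String) (h : s ≠ "") : s ++ t ≠ "" := by
  intro he; have := congrArg String.toList he
  simp [String.toList_append] at this; exact h this.1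

theorem toStr_ne_empty (n : Int) : PySem.Int.toStr n ≠ "" := by
  intro he; have := congrArg String.toList he
  rw [PySem.Int.toList_toStr] at this
  simp only [PySem.Int.toChars, String.toList_empty] at this
  split at this
  · exact absurd this (by simp)
  · exact absurd this (List.ne_nil_of_length_pos Nat.length_toDigits_pos)

theorem lit_plus : ((" " : String) ++ "+") ++ " " = " + " := by decide
theorem lit_minus : ((" " : String) ++ "-") ++ " " = " - " := by decide
theorem space_append_ne (s t u : String) : ((" " ++ s) ++ t) ++ u ≠ "" :=
  str_append_ne_empty_left _ _ (str_append_ne_empty_left _ _ (str_append_ne_empty_left _ _ (by decide)))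
theorem dash_append_ne (t : String) : ("-" : String) ++ t ≠ "" :=
  str_append_ne_empty_left _ _ (by decide)
theorem plus_append_ne (t : String) : (" + " : String) ++ t ≠ "" :=
  str_append_ne_empty_left _ _ (by decide)
theorem minus_append_ne (t : String) : (" - " : String) ++ t ≠ "" :=
  str_append_ne_empty_left _ _ (by decide)
theorem abs_eq_one_iff (x : Int) : |x| = 1 ↔ x = 1 ∨ x = -1 := abs_eq (by norm_num)

theorem sw_plus (t : String) : PySem.Str.startswith (" + " ++ t) " + " = true := by
  rw [PySem.Str.startswith_eq]
  exact (PySem.Chars.startswith_iff _ _).mpr (by simp [String.toList_append])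
theorem sw_minus (t : String) : PySem.Str.startswith (" - " ++ t) " + " = false := by
  rw [PySem.Str.startswith_eq]
  apply Bool.eq_false_iff.mpr
  intro h
  have := (PySem.Chars.startswith_iff _ _).mp h
  simp [String.toList_append, List.cons_prefix_cons] at this
theorem chars_sw_plus (L : List Char) : PySem.Chars.startswith (' '::'+'::' '::L) [' ','+',' '] = true :=
  (PySem.Chars.startswith_iff _ _).mpr ⟨L, rfl⟩
theorem chars_sw_minus (L : List Char) : PySem.Chars.startswith (' '::'-'::' '::L) [' ','+',' '] = false := by
  apply Bool.eq_false_iff.mpr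
  intro h
  have := (PySem.Chars.startswith_iff _ _).mp h
  simp [List.cons_prefix_cons] at this
theorem sl_plus (t : String) : PySem.Str.slice (" + " ++ t) (some 3) none = t := by
  apply String.ext
  rw [PySem.Str.toList_slice, PySem.Chars.slice_eq_listSlice,
      PySem.List.slice_from _ (by norm_num)]
  simp [String.toList_append]
theorem sl_minus (t : String) : PySem.Str.slice (" - " ++ t) (some 3) none = t := by
  apply String.ext
  rw [PySem.Str.toList_slice, PySem.Chars.slice_eq_listSlice,
      PySem.List.slice_from _ (by norm_num)]
  simp [String.toList_append]

theorem list_slice3 {α : Type} (x y z : α) (L : List α) : PySem.List.slice (x::y::z::L) (some 3) = L := by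
  rw [PySem.List.slice_from _ (by norm_num)]; rfl

theorem str_ext (s t : String) (h : s.toList = t.toList) : s = t := String.ext h
theorem join_one (x : String) : PySem.Str.join "" [x] = x := by
  apply str_ext; simp [PySem.Str.toList_join, PySem.Chars.join, List.intercalate]
theorem join_two (x y : String) : PySem.Str.join "" [x, y] = x ++ y := by
  apply str_ext; simp [PySem.Str.toList_join, PySem.Chars.join, String.toList_append, List.intercalate]
theorem join_three (x y z : String) : PySem.Str.join "" [x, y, z] = x ++ y ++ z := by
  apply str_ext; simp [PySem.Str.toList_join, PySem.Chars.join, String.toList_append, List.intercalate]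

theorem toStr_one : PySem.Int.toStr 1 = "1" := by decide
theorem toChars_one_len : (PySem.Int.toChars 1).length = 1 := by decide
theorem toStr_len_pos (n : Int) : 1 ≤ (PySem.Int.toChars n).length := by
  simp only [PySem.Int.toChars]
  split
  · simp
  · exact Nat.length_toDigits_pos

-- five-way sign/unit classification of a coefficient, phrased as rewrite equations
theorem cls (x : Int) :
    ((x = 0) = True ∧ (x > 0) = False ∧ (x = 1 ∨ x = -1) = False ∧ |x| = 0 ∧ (x = 1) = False ∧ (x = -1) = False ∧ (-x = 1) = False)
  ∨ ((x = 0) = False ∧ (x > 0) = True ∧ (x = 1 ∨ x = -1) = True ∧ |x| = 1 ∧ (x = 1) = True ∧ (x = -1) = False ∧ (-x = 1) = False)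
  ∨ ((x = 0) = False ∧ (x > 0) = False ∧ (x = 1 ∨ x = -1) = True ∧ |x| = 1 ∧ (x = 1) = False ∧ (x = -1) = True ∧ (-x = 1) = True)
  ∨ ((x = 0) = False ∧ (x > 0) = True ∧ (x = 1 ∨ x = -1) = False ∧ |x| = x ∧ (x = 1) = False ∧ (x = -1) = False ∧ (-x = 1) = False)
  ∨ ((x = 0) = False ∧ (x > 0) = False ∧ (x = 1 ∨ x = -1) = False ∧ |x| = -x ∧ (x = 1) = False ∧ (x = -1) = False ∧ (-x = 1) = False) := by
  obtain h | h | h | h | h := (by omega : x = 0 ∨ x = 1 ∨ x = -1 ∨ 1 < x ∨ x < -1)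
  · exact Or.inl ⟨eq_true h, eq_false (by omega), eq_false (by omega), by simp [h], eq_false (by omega), eq_false (by omega), eq_false (by omega)⟩
  · exact Or.inr (Or.inl ⟨eq_false (by omega), eq_true (by omega), eq_true (by omega), by simp [h], eq_true (by omega), eq_false (by omega), eq_false (by omega)⟩)
  · exact Or.inr (Or.inr (Or.inl ⟨eq_false (by omega), eq_false (by omega), eq_true (by omega), by simp [h], eq_false (by omega), eq_true (by omega), eq_true (by omega)⟩))
  · exact Or.inr (Or.inr (Or.inr (Or.inl ⟨eq_false (by omega), eq_true (by omega), eq_false (by omega), abs_of_pos (by omega), eq_false (by omega), eq_false (by omega), eq_false (by omega)⟩)))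
  · exact Or.inr (Or.inr (Or.inr (Or.inr ⟨eq_false (by omega), eq_false (by omega), eq_false (by omega), abs_of_neg (by omega), eq_false (by omega), eq_false (by omega), eq_false (by omega)⟩)))

theorem main_eq (a b c : Int) (var : String) (h : ¬ D_build_expression_py a b c var) :
    build_expression_py a b c var = build_expression_py_alt a b c var := by
  have hT := toStr_ne_empty
  have hTapp : ∀ (n : Int) (t : String), PySem.Int.toStr n ++ t ≠ "" :=
    fun n t => str_append_ne_empty_left _ _ (hT n)
  by_cases hv : var = ""
  · have hna : ¬(a = 1 ∨ a = -1) := fun hc => h ⟨hv, by tauto⟩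
    have hnb : ¬(b = 1 ∨ b = -1) := fun hc => h ⟨hv, by tauto⟩
    subst hv
    rcases cls a with ⟨ea0, ea1, ea2, ea3, ea4, ea5, ea6⟩ | ⟨ea0, ea1, ea2, ea3, ea4, ea5, ea6⟩ | ⟨ea0, ea1, ea2, ea3, ea4, ea5, ea6⟩ | ⟨ea0, ea1, ea2, ea3, ea4, ea5, ea6⟩ | ⟨ea0, ea1, ea2, ea3, ea4, ea5, ea6⟩ <;>
    first
      | exact absurd (of_eq_true ea2) hna
      | (rcases cls b with ⟨eb0, eb1, eb2, eb3, eb4, eb5, eb6⟩ | ⟨eb0, eb1, eb2, eb3, eb4, eb5, eb6⟩ | ⟨eb0, eb1, eb2, eb3, eb4, eb5, eb6⟩ | ⟨eb0, eb1, eb2, eb3, eb4, eb5, eb6⟩ | ⟨eb0, eb1, eb2, eb3, eb4, eb5, eb6⟩ <;>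
         first
           | exact absurd (of_eq_true eb2) hnb
           | (rcases cls c with ⟨ec0, ec1, ec2, ec3, ec4, ec5, ec6⟩ | ⟨ec0, ec1, ec2, ec3, ec4, ec5, ec6⟩ | ⟨ec0, ec1, ec2, ec3, ec4, ec5, ec6⟩ | ⟨ec0, ec1, ec2, ec3, ec4, ec5, ec6⟩ | ⟨ec0, ec1, ec2, ec3, ec4, ec5, ec6⟩ <;>
              simp [build_expression_py, build_expression_py_alt, format_term, format_constant,
                List.foldl, abs_eq_one_iff, ea0, ea1, ea2, ea3, ea4, ea5, ea6, eb0, eb1, eb2, eb3, eb4, eb5, eb6, ec0, ec1, ec2, ec3, ec4, ec5, ec6,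
                hT, hTapp, space_append_ne, dash_append_ne, plus_append_ne, minus_append_ne,
                sw_plus, sw_minus, chars_sw_plus, chars_sw_minus, sl_plus, sl_minus, list_slice3, lit_plus, lit_minus, toStr_one,
                join_one, join_two, join_three, String.append_assoc] <;> decide))
  · rcases cls a with ⟨ea0, ea1, ea2, ea3, ea4, ea5, ea6⟩ | ⟨ea0, ea1, ea2, ea3, ea4, ea5, ea6⟩ | ⟨ea0, ea1, ea2, ea3, ea4, ea5, ea6⟩ | ⟨ea0, ea1, ea2, ea3, ea4, ea5, ea6⟩ | ⟨ea0, ea1, ea2, ea3, ea4, ea5, ea6⟩ <;>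
    rcases cls b with ⟨eb0, eb1, eb2, eb3, eb4, eb5, eb6⟩ | ⟨eb0, eb1, eb2, eb3, eb4, eb5, eb6⟩ | ⟨eb0, eb1, eb2, eb3, eb4, eb5, eb6⟩ | ⟨eb0, eb1, eb2, eb3, eb4, eb5, eb6⟩ | ⟨eb0, eb1, eb2, eb3, eb4, eb5, eb6⟩ <;>
    rcases cls c with ⟨ec0, ec1, ec2, ec3, ec4, ec5, ec6⟩ | ⟨ec0, ec1, ec2, ec3, ec4, ec5, ec6⟩ | ⟨ec0, ec1, ec2, ec3, ec4, ec5, ec6⟩ | ⟨ec0, ec1, ec2, ec3, ec4, ec5, ec6⟩ | ⟨ec0, ec1, ec2, ec3, ec4, ec5, ec6⟩ <;>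
    simp [build_expression_py, build_expression_py_alt, format_term, format_constant,
      List.foldl, abs_eq_one_iff, ea0, ea1, ea2, ea3, ea4, ea5, ea6, eb0, eb1, eb2, eb3, eb4, eb5, eb6, ec0, ec1, ec2, ec3, ec4, ec5, ec6, hv,
      hT, hTapp, space_append_ne, dash_append_ne, plus_append_ne, minus_append_ne,
      sw_plus, sw_minus, chars_sw_plus, chars_sw_minus, sl_plus, sl_minus, list_slice3, lit_plus, lit_minus, toStr_one,
      join_one, join_two, join_three, String.append_assoc] <;> try decide

theorem tight_ne (a b c : Int) (var : String) (hd : D_build_expression_py a b c var) :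
    build_expression_py a b c var ≠ build_expression_py_alt a b c var := by
  have hT := toStr_ne_empty
  have hTapp : ∀ (n : Int) (t : String), PySem.Int.toStr n ++ t ≠ "" :=
    fun n t => str_append_ne_empty_left _ _ (hT n)
  have hLa := toStr_len_pos |a|
  have hLb := toStr_len_pos |b|
  have hLc := toStr_len_pos |c|
  have hLa1 := toStr_len_pos a
  have hLb1 := toStr_len_pos b
  have hLc1 := toStr_len_pos c
  have hLa2 := toStr_len_pos (-a)
  have hLb2 := toStr_len_pos (-b)
  have hLc2 := toStr_len_pos (-c)
  obtain ⟨hv, hcase⟩ := hd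
  subst hv
  obtain h | h | h | h := hcase <;>
  [rcases cls b with ⟨e0, e1, e2, e3, e4, e5, e6⟩ | ⟨e0, e1, e2, e3, e4, e5, e6⟩ | ⟨e0, e1, e2, e3, e4, e5, e6⟩ | ⟨e0, e1, e2, e3, e4, e5, e6⟩ | ⟨e0, e1, e2, e3, e4, e5, e6⟩;
   rcases cls b with ⟨e0, e1, e2, e3, e4, e5, e6⟩ | ⟨e0, e1, e2, e3, e4, e5, e6⟩ | ⟨e0, e1, e2, e3, e4, e5, e6⟩ | ⟨e0, e1, e2, e3, e4, e5, e6⟩ | ⟨e0, e1, e2, e3, e4, e5, e6⟩;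
   rcases cls a with ⟨e0, e1, e2, e3, e4, e5, e6⟩ | ⟨e0, e1, e2, e3, e4, e5, e6⟩ | ⟨e0, e1, e2, e3, e4, e5, e6⟩ | ⟨e0, e1, e2, e3, e4, e5, e6⟩ | ⟨e0, e1, e2, e3, e4, e5, e6⟩;
   rcases cls a with ⟨e0, e1, e2, e3, e4, e5, e6⟩ | ⟨e0, e1, e2, e3, e4, e5, e6⟩ | ⟨e0, e1, e2, e3, e4, e5, e6⟩ | ⟨e0, e1, e2, e3, e4, e5, e6⟩ | ⟨e0, e1, e2, e3, e4, e5, e6⟩] <;>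
  rcases cls c with ⟨f0, f1, f2, f3, f4, f5, f6⟩ | ⟨f0, f1, f2, f3, f4, f5, f6⟩ | ⟨f0, f1, f2, f3, f4, f5, f6⟩ | ⟨f0, f1, f2, f3, f4, f5, f6⟩ | ⟨f0, f1, f2, f3, f4, f5, f6⟩ <;>
  simp [build_expression_py, build_expression_py_alt, format_term, format_constant,
    List.foldl, abs_eq_one_iff, h, e0, e1, e2, e3, e4, e5, e6, f0, f1, f2, f3, f4, f5, f6,
    hT, hTapp, space_append_ne, dash_append_ne, plus_append_ne, minus_append_ne,
    sw_plus, sw_minus, chars_sw_plus, chars_sw_minus, sl_plus, sl_minus, list_slice3, lit_plus, lit_minus, toStr_one,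
    join_one, join_two, join_three, String.append_assoc] <;>
  first
    | decide
    | (exfalso; omega)
    | (intro heq; have hl := congrArg (fun s => s.toList.length) heq;
       simp [String.toList_append, PySem.Int.toList_toStr, toStr_one, toChars_one_len,
         PySem.Str.toList_slice, PySem.Chars.slice_eq_listSlice, list_slice3] at hl <;> omega)

-- ===== VERDICT (by name: the statement is the Claim_ definition above) =====
theorem build_expression_py_spec : Claim_unchanged_build_expression_py := by
  intro a b c var _ h
  exact main_eq a b c var h

theorem build_expression_py_changed : Claim_changed_build_expression_py := by
  unfold Claim_changed_build_expression_py; decide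

theorem build_expression_py_tight : Claim_exact_build_expression_py := by
  intro a b c var _ hd
  exact tight_ne a b c var hd
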